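-- pv_equiv track=rewrite | github.com/narmafraz/ThaqalaynDataGenerator | app/wikishia/scraper.py | _strip_templates
-- ===== SOURCE A (Python) =====
-- def _strip_templates(wikitext: str) -> str:
--     """Remove top-level {{ }} template blocks from wikitext."""
--     result = []
--     depth = 0
--     i = 0
--     while i < len(wikitext):
--         if i + 1 < len(wikitext) and wikitext[i:i+2] == '{{':
--             depth += 1
--             i += 2
--         elif i + 1 < len(wikitext) and wikitext[i:i+2] == '}}':
--             depth = max(0, depth - 1)
--             i += 2
--         else:
--             if depth == 0:
--                 result.append(wikitext[i])
--             i += 1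
--     return ''.join(result)
-- ===== SOURCE B (Python) =====
-- import re
--
-- def _strip_templates(wikitext: str) -> str:
--     """Remove top-level {{ }} template blocks from wikitext."""
--     tokens = re.split(r'(\{\{|\}\})', wikitext)
--     out = []
--     depth = 0
--     for tok in tokens:
--         if tok == '{{':
--             depth += 1
--         elif tok == '}}':
--             depth = max(0, depth - 1)
--         elif depth == 0:
--             out.append(tok)
--     return ''.join(out)
-- ===== Notes on version B (the rewrite author's own statement) =====
-- stated objective: faster
-- what changed: Replaced the index-based per-character scan with re.split on the brace delimiters followed by a single depth-counting fold over the token list.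
import Mathlib
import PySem

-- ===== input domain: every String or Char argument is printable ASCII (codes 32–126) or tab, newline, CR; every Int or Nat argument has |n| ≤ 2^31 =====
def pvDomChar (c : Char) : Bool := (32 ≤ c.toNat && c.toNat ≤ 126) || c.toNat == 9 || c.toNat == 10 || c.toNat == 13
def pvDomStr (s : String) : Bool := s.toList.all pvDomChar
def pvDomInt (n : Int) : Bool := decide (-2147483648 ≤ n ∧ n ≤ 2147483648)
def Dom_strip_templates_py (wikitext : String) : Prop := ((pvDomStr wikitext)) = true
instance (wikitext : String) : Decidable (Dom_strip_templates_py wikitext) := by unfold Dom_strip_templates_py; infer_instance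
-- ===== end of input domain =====

-- B replaces A's per-character index scan with a re.split tokenisation followed by a
-- depth-counting fold over the token list (objective: faster by a constant factor; same return value).

-- ===== PORT A =====
-- A's while loop over index i: check wikitext[i:i+2] == '{{', then '}}', else copy the
-- single character when depth == 0; rendered as structural recursion over the char list.
def stripGoA : List Char → Int → List Char
  | [], _ => []
  | '{' :: '{' :: rest, d => stripGoA rest (d + 1)
  | '}' :: '}' :: rest, d => stripGoA rest (max 0 (d - 1))
  | c :: rest, d => (if d = 0 then [c] else []) ++ stripGoA rest d

def strip_templates_py (wikitext : String) : String :=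
  String.ofList (stripGoA wikitext.toList 0)

-- ===== PORT B =====
-- re.split(r'(\{\{|\}\})', wikitext): leftmost match, '{{' tried before '}}'; yields
-- text chunks (possibly empty) interleaved with the captured delimiter tokens.
def stripTok : List Char → List Char → List (List Char)
  | [], acc => [acc.reverse]
  | '{' :: '{' :: rest, acc => acc.reverse :: ['{', '{'] :: stripTok rest []
  | '}' :: '}' :: rest, acc => acc.reverse :: ['}', '}'] :: stripTok rest []
  | c :: rest, acc => stripTok rest (c :: acc)

-- B's for-loop over the tokens maintaining depth, keeping text tokens at depth 0
def stripConsume : List (List Char) → Int → List Char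
  | [], _ => []
  | t :: ts, d =>
    if t = ['{', '{'] then stripConsume ts (d + 1)
    else if t = ['}', '}'] then stripConsume ts (max 0 (d - 1))
    else (if d = 0 then t else []) ++ stripConsume ts d

def strip_templates_py_alt (wikitext : String) : String :=
  String.ofList (stripConsume (stripTok wikitext.toList []) 0)

-- ===== PRECONDITION & SPEC =====
def Spec_strip_templates_py (wikitext : String) (out : String) : Prop := out = strip_templates_py_alt wikitext
instance (wikitext : String) (out : String) : Decidable (Spec_strip_templates_py wikitext out) := by unfold Spec_strip_templates_py; infer_instance

-- ===== CLAIM (what is proved, stated in full; the proofs are below) =====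
def Claim_equal_strip_templates_py : Prop := ∀ (wikitext : String), Dom_strip_templates_py wikitext → Spec_strip_templates_py wikitext (strip_templates_py wikitext)

-- ===== LEMMAS AND PROOFS =====

-- A's single-character step, valid whenever the position is not a delimiter
theorem stripGoA_single (c : Char) (rest : List Char) (d : Int)
    (h1 : ∀ (r : List Char), c = '{' → rest = '{' :: r → False)
    (h2 : ∀ (r : List Char), c = '}' → rest = '}' :: r → False) :
    stripGoA (c :: rest) d = (if d = 0 then [c] else []) ++ stripGoA rest d := by
  rw [stripGoA.eq_def]
  split
  · rename_i heq; exact absurd heq (by simp)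
  · rename_i r heq; injection heq with hc h
    exact (h1 r hc h).elim
  · rename_i r heq; injection heq with hc h
    exact (h2 r hc h).elim
  · rename_i heq; injection heq with hc hr; subst hc; subst hr; rfl

-- B's tokenizer single-character step, under the same non-delimiter condition
theorem stripTok_single (c : Char) (rest acc : List Char)
    (h1 : ∀ (r : List Char), c = '{' → rest = '{' :: r → False)
    (h2 : ∀ (r : List Char), c = '}' → rest = '}' :: r → False) :
    stripTok (c :: rest) acc = stripTok rest (c :: acc) := by
  rw [stripTok.eq_def]
  split
  · rename_i heq; exact absurd heq (by simp)
  · rename_i r heq; injection heq with hc h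
    exact (h1 r hc h).elim
  · rename_i r heq; injection heq with hc h
    exact (h2 r hc h).elim
  · rename_i heq; injection heq with hc hr; subst hc; subst hr; rfl

-- Main invariant: acc holds the reversed current text chunk; it is never itself a
-- delimiter and its newest char cannot pair with the next input char into one.
theorem strip_main (cs acc : List Char) :
    ∀ (d : Int), acc ≠ ['{', '{'] → acc ≠ ['}', '}'] →
    (acc.head? = some '{' → cs.head? ≠ some '{') →
    (acc.head? = some '}' → cs.head? ≠ some '}') →
    stripConsume (stripTok cs acc) d
      = (if d = 0 then acc.reverse else []) ++ stripGoA cs d := by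
  induction cs, acc using stripTok.induct with
  | case1 acc =>
    intro d h1 h2 _ _
    have ha : acc.reverse ≠ ['{', '{'] := by
      intro h; exact h1 (by simpa using congrArg List.reverse h)
    have hb : acc.reverse ≠ ['}', '}'] := by
      intro h; exact h2 (by simpa using congrArg List.reverse h)
    simp [stripTok, stripConsume, stripGoA, ha, hb]
  | case2 rest acc ih =>
    intro d h1 h2 h3 h4
    have ha : acc.reverse ≠ ['{', '{'] := by
      intro h; exact h1 (by simpa using congrArg List.reverse h)
    have hb : acc.reverse ≠ ['}', '}'] := by
      intro h; exact h2 (by simpa using congrArg List.reverse h)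
    simp only [stripTok, stripConsume, stripGoA, if_neg ha, if_neg hb,
      if_neg (show ¬(['{','{'] : List Char) = ['}','}'] by decide)]
    rw [ih (d + 1) (by simp) (by simp) (by simp) (by simp)]
    simp
  | case3 rest acc ih =>
    intro d h1 h2 h3 h4
    have ha : acc.reverse ≠ ['{', '{'] := by
      intro h; exact h1 (by simpa using congrArg List.reverse h)
    have hb : acc.reverse ≠ ['}', '}'] := by
      intro h; exact h2 (by simpa using congrArg List.reverse h)
    simp only [stripTok, stripConsume, stripGoA, if_neg ha, if_neg hb,
      if_neg (show ¬(['}','}'] : List Char) = ['{','{'] by decide)]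
    rw [ih (max 0 (d - 1)) (by simp) (by simp) (by simp) (by simp)]
    simp
  | case4 c rest acc hno1 hno2 ih =>
    intro d h1 h2 h3 h4
    rw [stripTok_single c rest acc hno1 hno2, stripGoA_single c rest d hno1 hno2]
    rw [ih d
      (by intro h; injection h with hc hr; subst hc; subst hr
          exact h3 rfl (by simp))
      (by intro h; injection h with hc hr; subst hc; subst hr
          exact h4 rfl (by simp))
      (by intro h hr
          have hc : c = '{' := by simpa using h
          obtain ⟨r, hrr⟩ := List.head?_eq_some_iff.mp hr
          exact (hno1 r hc hrr).elim)
      (by intro h hr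
          have hc : c = '}' := by simpa using h
          obtain ⟨r, hrr⟩ := List.head?_eq_some_iff.mp hr
          exact (hno2 r hc hrr).elim)]
    by_cases hd : d = 0 <;> simp [hd]

-- ===== VERDICT (by name: the statement is the Claim_ definition above) =====
theorem strip_templates_py_spec : Claim_equal_strip_templates_py := by
  intro wikitext _
  unfold Spec_strip_templates_py strip_templates_py strip_templates_py_alt
  rw [strip_main wikitext.toList [] 0 (by simp) (by simp) (by simp) (by simp)]
  simp
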